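-- pv_equiv track=rewrite | github.com/pushkarcodes110/betting-app-by-vasu | userbaseapp/views.py | generate_three_digit_numbers
-- ===== SOURCE A (Python) =====
-- def generate_three_digit_numbers(digits_string):
--     """
--     Generate 3-digit numbers from given digits with custom rules:
--     - Custom order: 1 < 2 < 3 < 4 < 5 < 6 < 7 < 8 < 9 < 0
--     - Pattern: a < b < c (strictly increasing)
--     - 0 can only appear at position c (last position)
--     - Digits can repeat
--     """
--
--     # Define custom order: 1 is smallest, 0 is largest
--     order_map = {'1': 1, '2': 2, '3': 3, '4': 4, '5': 5,
--                  '6': 6, '7': 7, '8': 8, '9': 9, '0': 10}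
--
--     # Get unique digits from input
--     available_digits = list(set(digits_string))
--
--     valid_numbers = []
--
--     # Generate all possible 3-digit combinations
--     for a in available_digits:
--         for b in available_digits:
--             for c in available_digits:
--                 # Rule: 0 can only be at position c
--                 if a == '0' or b == '0':
--                     continue
--
--                 # Rule: a < b < c (using custom order)
--                 if order_map[a] < order_map[b] < order_map[c]:
--                     number = a + b + c
--                     valid_numbers.append(number)
--
--     return sorted(valid_numbers)
-- ===== SOURCE B (Python) =====
-- def _combinations(lst, r):
--     # hand-rolled itertools.combinations(lst, r) (A imports nothing, so neither do we)
--     if r == 0: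
--         return [[]]
--     if not lst:
--         return []
--     head, rest = lst[0], lst[1:]
--     return [[head] + c for c in _combinations(rest, r - 1)] + _combinations(rest, r)
--
--
-- def generate_three_digit_numbers(digits_string):
--     order = list("1234567890")
--     ds = sorted(set(digits_string), key=order.index)
--     return sorted("".join(c) for c in _combinations(ds, 3))
-- ===== Notes on version B (the rewrite author's own statement) =====
-- stated objective: simpler
-- what changed: B sorts the distinct digits once under the custom order and emits 3-combinations of that sorted list directly (hand-rolled combinations), instead of A's triple nested loop that tests every (a,b,c) with per-triple order_map comparisons and a 0-position guard.
import Mathlib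
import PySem

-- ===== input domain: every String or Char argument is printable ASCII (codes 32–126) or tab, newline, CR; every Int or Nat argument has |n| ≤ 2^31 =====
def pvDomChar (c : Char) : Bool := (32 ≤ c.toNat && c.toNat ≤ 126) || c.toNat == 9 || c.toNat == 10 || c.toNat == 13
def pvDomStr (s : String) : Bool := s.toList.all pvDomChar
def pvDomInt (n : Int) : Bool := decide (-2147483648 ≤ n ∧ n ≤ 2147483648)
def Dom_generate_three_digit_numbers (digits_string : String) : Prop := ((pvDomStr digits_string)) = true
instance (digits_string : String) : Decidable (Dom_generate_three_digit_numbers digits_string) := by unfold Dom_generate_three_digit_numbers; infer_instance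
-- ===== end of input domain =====

-- B replaces A's filter-all-triples triple loop by one sort of the distinct digits under the
-- custom order followed by direct 3-combination generation (simpler; same final sorted output).

-- ===== PORT A =====
-- A's local dict literal order_map (KeyError impossible under Pre_, so lookups are ported as getD)
def pvOrderMap : PySem.Dict Char Int := PySem.Dict.ofList
  [('1', 1), ('2', 2), ('3', 3), ('4', 4), ('5', 5),
   ('6', 6), ('7', 7), ('8', 8), ('9', 9), ('0', 10)]

-- list(set(digits_string)) → PySem.Set.ofList; CPython's set iteration order is not modelled, but the
-- returned value is sorted at the end, so it does not depend on that order. a + b + c on the three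
-- 1-char strings is the string [a, b, c].
def generate_three_digit_numbers (digits_string : String) : List String :=
  PySem.List.sorted
    ((PySem.Set.ofList digits_string.toList).foldl (fun acc1 a =>
      (PySem.Set.ofList digits_string.toList).foldl (fun acc2 b =>
        (PySem.Set.ofList digits_string.toList).foldl (fun acc3 c =>
          if a = '0' ∨ b = '0' then acc3
          else if pvOrderMap.getD a 0 < pvOrderMap.getD b 0 ∧ pvOrderMap.getD b 0 < pvOrderMap.getD c 0
          then acc3 ++ [String.ofList [a, b, c]]
          else acc3) acc2) acc1) [])
    (fun x => x) false

-- ===== PORT B =====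
-- Source B's `order = list("1234567890")`
def pvOrderList : List Char := "1234567890".toList

-- Source B's hand-rolled _combinations(lst, r) is exactly the recursion of PySem.List.combinations
-- (same branches: r == 0 → [[]], empty → [], else head-prefixed (r-1)-combos of the tail ++ r-combos
-- of the tail), so it is ported as that function. order.index raises ValueError only outside Pre_,
-- hence the total form (index? …).getD 0; "".join of the three 1-char strings is String.ofList.
def generate_three_digit_numbers_alt (digits_string : String) : List String :=
  PySem.List.sorted
    ((PySem.List.combinations
        (PySem.List.sorted (PySem.Set.ofList digits_string.toList)
          (fun d => (PySem.List.index? pvOrderList d).getD 0) false) 3).map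
      (fun c => String.ofList c))
    (fun x => x) false

-- ===== PRECONDITION & SPEC =====
-- Pre_ excludes exactly the strings containing a non-digit character: there A raises KeyError
-- (order_map[a]) and B raises ValueError (order.index).
def Pre_generate_three_digit_numbers (digits_string : String) : Prop :=
  (digits_string.toList.all fun c => "1234567890".toList.contains c) = true
instance (digits_string : String) : Decidable (Pre_generate_three_digit_numbers digits_string) := by
  unfold Pre_generate_three_digit_numbers; infer_instance
def pvWitness_generate_three_digit_numbers : String := "1290"

def Spec_generate_three_digit_numbers (digits_string : String) (out : List String) : Prop :=
  out = generate_three_digit_numbers_alt digits_string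
instance (digits_string : String) (out : List String) : Decidable (Spec_generate_three_digit_numbers digits_string out) := by
  unfold Spec_generate_three_digit_numbers; infer_instance

-- ===== CLAIM (what is proved, stated in full; the proofs are below) =====
def Claim_equal_generate_three_digit_numbers : Prop := ∀ (digits_string : String), Dom_generate_three_digit_numbers digits_string → Pre_generate_three_digit_numbers digits_string → Spec_generate_three_digit_numbers digits_string (generate_three_digit_numbers digits_string)

-- ===== LEMMAS AND PROOFS =====

-- B's sort key, as a named function
def pvOrd (c : Char) : Nat := (PySem.List.index? pvOrderList c).getD 0

-- A's filtered triple loop, as a flatMap over an arbitrary carrier list N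
def pvT (N : List Char) : List String :=
  N.flatMap (fun a => N.flatMap (fun b =>
    (N.filter (fun c => decide (pvOrd a < pvOrd b ∧ pvOrd b < pvOrd c))).map
      (fun c => String.ofList [a, b, c])))

-- the same triples as raw char lists
def pvU3 (N : List Char) : List (List Char) :=
  N.flatMap (fun a => N.flatMap (fun b =>
    (N.filter (fun c => decide (pvOrd a < pvOrd b ∧ pvOrd b < pvOrd c))).map
      (fun c => [a, b, c])))

def pvU2 (N : List Char) : List (List Char) :=
  N.flatMap (fun b => (N.filter (fun c => decide (pvOrd b < pvOrd c))).map (fun c => [b, c]))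

-- On digit characters, A's combined test (the 0-guard plus the order_map comparisons) is exactly
-- B's pvOrd comparison chain: the guard is redundant because '0' has the maximal order.
lemma pvCond_eq_bool :
    ("1234567890".toList.all fun a => "1234567890".toList.all fun b => "1234567890".toList.all fun c =>
      (decide (¬(a = '0' ∨ b = '0') ∧ pvOrderMap.getD a 0 < pvOrderMap.getD b 0 ∧
                pvOrderMap.getD b 0 < pvOrderMap.getD c 0)
        == decide (pvOrd a < pvOrd b ∧ pvOrd b < pvOrd c))) = true := by decide

lemma pvCond_iff {a b c : Char} (ha : a ∈ "1234567890".toList) (hb : b ∈ "1234567890".toList)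
    (hc : c ∈ "1234567890".toList) :
    ((¬(a = '0' ∨ b = '0')) ∧ pvOrderMap.getD a 0 < pvOrderMap.getD b 0 ∧
        pvOrderMap.getD b 0 < pvOrderMap.getD c 0) ↔
      (pvOrd a < pvOrd b ∧ pvOrd b < pvOrd c) := by
  have h := pvCond_eq_bool
  simp only [List.all_eq_true, beq_iff_eq] at h
  exact decide_eq_decide.mp (h a ha b hb c hc)

lemma pvOrd_inj_bool :
    ("1234567890".toList.all fun a => "1234567890".toList.all fun b =>
      !(pvOrd a == pvOrd b) || (a == b)) = true := by decide

lemma pvOrd_inj {a b : Char} (ha : a ∈ "1234567890".toList) (hb : b ∈ "1234567890".toList)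
    (h : pvOrd a = pvOrd b) : a = b := by
  have hh := pvOrd_inj_bool
  simp only [List.all_eq_true, Bool.or_eq_true, Bool.not_eq_true', beq_iff_eq,
    beq_eq_false_iff_ne] at hh
  rcases hh a ha b hb with h' | h'
  · exact absurd h h'
  · exact h'

-- the innermost loop of A, rewritten as filter/map (a b fixed, all chars digits)
lemma pvInner_eq (L : List Char) (a b : Char) (hL : ∀ x ∈ L, x ∈ "1234567890".toList)
    (ha : a ∈ "1234567890".toList) (hb : b ∈ "1234567890".toList) (acc : List String) :
    L.foldl (fun acc3 c =>
        if a = '0' ∨ b = '0' then acc3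
        else if pvOrderMap.getD a 0 < pvOrderMap.getD b 0 ∧ pvOrderMap.getD b 0 < pvOrderMap.getD c 0
        then acc3 ++ [String.ofList [a, b, c]]
        else acc3) acc
      = acc ++ (L.filter (fun c => decide (pvOrd a < pvOrd b ∧ pvOrd b < pvOrd c))).map
          (fun c => String.ofList [a, b, c]) := by
  rw [PySem.List.foldl_congr_mem'
    (g := fun acc3 c => if pvOrd a < pvOrd b ∧ pvOrd b < pvOrd c
      then acc3 ++ [String.ofList [a, b, c]] else acc3)]
  · exact PySem.List.foldl_append_ite _ _ _ _
  · intro c hc acc3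
    have hiff := pvCond_iff ha hb (hL c hc)
    split_ifs <;> tauto

-- the middle loop of A
lemma pvMid_eq (L : List Char) (a : Char) (hL : ∀ x ∈ L, x ∈ "1234567890".toList)
    (ha : a ∈ "1234567890".toList) (acc : List String) :
    L.foldl (fun acc2 b =>
      L.foldl (fun acc3 c =>
        if a = '0' ∨ b = '0' then acc3
        else if pvOrderMap.getD a 0 < pvOrderMap.getD b 0 ∧ pvOrderMap.getD b 0 < pvOrderMap.getD c 0
        then acc3 ++ [String.ofList [a, b, c]]
        else acc3) acc2) acc
      = acc ++ L.flatMap (fun b =>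
          (L.filter (fun c => decide (pvOrd a < pvOrd b ∧ pvOrd b < pvOrd c))).map
            (fun c => String.ofList [a, b, c])) := by
  rw [PySem.List.foldl_congr_mem'
    (g := fun acc2 b => acc2 ++ (L.filter (fun c => decide (pvOrd a < pvOrd b ∧ pvOrd b < pvOrd c))).map
      (fun c => String.ofList [a, b, c]))]
  · exact PySem.List.foldl_append_eq_flatMap _ _ _
  · intro b hb acc2
    exact pvInner_eq L a b hL ha (hL b hb) acc2

-- A's whole triple loop is pvT of the distinct-digit list
lemma pvA_loop_eq (L : List Char) (hL : ∀ x ∈ L, x ∈ "1234567890".toList) :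
    L.foldl (fun acc1 a =>
      L.foldl (fun acc2 b =>
        L.foldl (fun acc3 c =>
          if a = '0' ∨ b = '0' then acc3
          else if pvOrderMap.getD a 0 < pvOrderMap.getD b 0 ∧ pvOrderMap.getD b 0 < pvOrderMap.getD c 0
          then acc3 ++ [String.ofList [a, b, c]]
          else acc3) acc2) acc1) []
      = pvT L := by
  rw [PySem.List.foldl_congr_mem'
    (g := fun acc1 a => acc1 ++ L.flatMap (fun b =>
      (L.filter (fun c => decide (pvOrd a < pvOrd b ∧ pvOrd b < pvOrd c))).map
        (fun c => String.ofList [a, b, c])))]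
  · rw [PySem.List.foldl_append_eq_flatMap]; rfl
  · intro a ha acc1
    exact pvMid_eq L a hL (hL a ha) acc1

lemma pvT_perm {N M : List Char} (h : N.Perm M) : (pvT N).Perm (pvT M) := by
  unfold pvT
  refine ((List.Perm.flatMap_right _ h).trans (List.Perm.flatMap_left _ ?_))
  intro a _
  refine ((List.Perm.flatMap_right _ h).trans (List.Perm.flatMap_left _ ?_))
  intro b _
  exact (h.filter _).map _

lemma pvT_eq_map_mk (N : List Char) : pvT N = (pvU3 N).map (fun l => String.ofList l) := by
  unfold pvT pvU3
  rw [List.map_flatMap]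
  apply List.flatMap_congr
  intro a _
  rw [List.map_flatMap]
  apply List.flatMap_congr
  intro b _
  rw [List.map_map]
  rfl

lemma pvU2_eq (M : List Char) (hM : M.Pairwise (fun u v => pvOrd u < pvOrd v)) :
    pvU2 M = PySem.List.combinations M 2 := by
  induction M with
  | nil => rfl
  | cons x t ih =>
    rcases List.pairwise_cons.mp hM with ⟨hx, ht⟩
    rw [PySem.List.combinations_cons_succ, PySem.List.combinations_one]
    unfold pvU2
    rw [List.flatMap_cons]
    have h1 : ((x :: t).filter (fun c => decide (pvOrd x < pvOrd c))) = t := by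
      rw [List.filter_cons]
      simp only [Nat.lt_irrefl, decide_false, Bool.false_eq_true, if_false]
      exact List.filter_eq_self.mpr (fun c hc => by simp [hx c hc])

    rw [h1]
    have h2 : t.flatMap (fun b => ((x :: t).filter (fun c => decide (pvOrd b < pvOrd c))).map
        (fun c => [b, c])) = pvU2 t := by
      apply List.flatMap_congr
      intro b hb
      rw [List.filter_cons]
      simp [Nat.lt_asymm (hx b hb)]
    rw [h2, ih ht]
    simp [List.map_map, Function.comp]

lemma pvU3_eq (M : List Char) (hM : M.Pairwise (fun u v => pvOrd u < pvOrd v)) :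
    pvU3 M = PySem.List.combinations M 3 := by
  induction M with
  | nil => rfl
  | cons x t ih =>
    rcases List.pairwise_cons.mp hM with ⟨hx, ht⟩
    rw [PySem.List.combinations_cons_succ]
    unfold pvU3
    rw [List.flatMap_cons]
    -- head part: a = x gives the x-prefixed 2-combinations of t
    have hhead : (x :: t).flatMap (fun b =>
        ((x :: t).filter (fun c => decide (pvOrd x < pvOrd b ∧ pvOrd b < pvOrd c))).map
          (fun c => [x, b, c])) = (PySem.List.combinations t 2).map (x :: ·) := by
      rw [List.flatMap_cons]
      have hbx : ((x :: t).filter (fun c => decide (pvOrd x < pvOrd x ∧ pvOrd x < pvOrd c))) = [] := by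
        apply List.filter_eq_nil_iff.mpr
        intro c _
        simp
      rw [hbx]
      have hbody : t.flatMap (fun b =>
          ((x :: t).filter (fun c => decide (pvOrd x < pvOrd b ∧ pvOrd b < pvOrd c))).map
            (fun c => [x, b, c]))
          = (pvU2 t).map (x :: ·) := by
        unfold pvU2
        rw [List.map_flatMap]
        apply List.flatMap_congr
        intro b hb
        rw [List.filter_cons]
        simp only [Nat.lt_asymm (hx b hb), and_false, decide_false, Bool.false_eq_true, if_false]
        have hfe : (t.filter (fun c => decide (pvOrd x < pvOrd b ∧ pvOrd b < pvOrd c)))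
            = t.filter (fun c => decide (pvOrd b < pvOrd c)) := by
          apply List.filter_congr
          intro c _
          simp [hx b hb]
        rw [hfe, List.map_map]
        rfl
      rw [hbody, pvU2_eq t ht]
      simp
    rw [hhead]
    -- tail part: a ∈ t never matches b = x or c = x, so it is pvU3 t
    have htail : t.flatMap (fun a => (x :: t).flatMap (fun b =>
        ((x :: t).filter (fun c => decide (pvOrd a < pvOrd b ∧ pvOrd b < pvOrd c))).map
          (fun c => [a, b, c]))) = pvU3 t := by
      unfold pvU3
      apply List.flatMap_congr
      intro a ha
      rw [List.flatMap_cons]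
      have hbx : ((x :: t).filter (fun c => decide (pvOrd a < pvOrd x ∧ pvOrd x < pvOrd c))) = [] := by
        apply List.filter_eq_nil_iff.mpr
        intro c _
        simp [Nat.lt_asymm (hx a ha)]
      rw [hbx]
      simp only [List.map_nil, List.nil_append]
      apply List.flatMap_congr
      intro b hb
      rw [List.filter_cons]
      simp [Nat.lt_asymm (hx b hb)]
    rw [htail, ih ht]

-- the sorted distinct-digit list is strictly increasing under pvOrd
lemma pvM_strict (L : List Char) (hnd : L.Nodup) (hL : ∀ x ∈ L, x ∈ "1234567890".toList) :
    (PySem.List.sorted L (fun d => (PySem.List.index? pvOrderList d).getD 0) false).Pairwise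
      (fun u v => pvOrd u < pvOrd v) := by
  have hperm := PySem.List.sorted_perm L (fun d => (PySem.List.index? pvOrderList d).getD 0) false
  have hle := PySem.List.sorted_pairwise L (fun d => (PySem.List.index? pvOrderList d).getD 0)
  have hndM := (hperm.nodup_iff).mpr hnd
  have hne : (PySem.List.sorted L (fun d => (PySem.List.index? pvOrderList d).getD 0) false).Pairwise
      (fun u v => u ≠ v) := hndM
  refine (hle.and hne).imp_of_mem ?_
  intro u v hu hv hr
  have hu' : u ∈ "1234567890".toList := hL u (hperm.mem_iff.mp hu)
  have hv' : v ∈ "1234567890".toList := hL v (hperm.mem_iff.mp hv)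
  have : pvOrd u ≤ pvOrd v := hr.1
  exact lt_of_le_of_ne this (fun he => hr.2 (pvOrd_inj hu' hv' he))

-- ===== VERDICT (by name: the statement is the Claim_ definition above) =====
theorem generate_three_digit_numbers_spec : Claim_equal_generate_three_digit_numbers := by
  intro s _ hpre
  unfold Pre_generate_three_digit_numbers at hpre
  simp only [List.all_eq_true, List.contains_iff_mem] at hpre
  unfold Spec_generate_three_digit_numbers generate_three_digit_numbers generate_three_digit_numbers_alt
  have hL : ∀ x ∈ PySem.Set.ofList s.toList, x ∈ "1234567890".toList := by
    intro x hx
    exact hpre x ((PySem.Set.mem_ofList s.toList x).mp hx)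
  have hnd : (PySem.Set.ofList s.toList : List Char).Nodup := PySem.Set.nodup_ofList s.toList
  rw [pvA_loop_eq _ hL]
  apply PySem.List.sorted_eq_sorted_of_perm _ _ _ Function.injective_id
  have hstrict := pvM_strict _ hnd hL
  have h1 := pvT_perm (PySem.List.sorted_perm (PySem.Set.ofList s.toList)
    (fun d => (PySem.List.index? pvOrderList d).getD 0) false).symm
  rw [pvT_eq_map_mk (PySem.List.sorted (PySem.Set.ofList s.toList)
    (fun d => (PySem.List.index? pvOrderList d).getD 0) false), pvU3_eq _ hstrict] at h1
  exact h1
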